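-- pv_equiv track=rewrite | github.com/eldannywillmd/LeetCode | array/42-Trapping Rain Water.py | calculate_water_in_line
-- ===== SOURCE A (Python) =====
-- def calculate_water_in_line(height, h):
--     blocks = []
--     water = 0
--
--     for index, element in enumerate(height):
--         if element >= h:
--             blocks.append(index)
--             if len(blocks) > 1 and blocks[-1] - blocks[-2] > 1:
--                 water += blocks[-1] - blocks[-2] - 1
--
--     return water
-- ===== SOURCE B (Python) =====
-- def calculate_water_in_line(height, h):
--     idxs = [i for i, v in enumerate(height) if v >= h]
--     if len(idxs) < 2:
--         return 0
--     return idxs[-1] - idxs[0] - len(idxs) + 1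
-- ===== Notes on version B (the rewrite author's own statement) =====
-- stated objective: simpler
-- what changed: Replaces the running blocks-list/gap accumulation with a closed form: collect the qualifying indices once and return last - first - count + 1 (0 if fewer than two), using the telescoping of consecutive gaps.
import Mathlib
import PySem

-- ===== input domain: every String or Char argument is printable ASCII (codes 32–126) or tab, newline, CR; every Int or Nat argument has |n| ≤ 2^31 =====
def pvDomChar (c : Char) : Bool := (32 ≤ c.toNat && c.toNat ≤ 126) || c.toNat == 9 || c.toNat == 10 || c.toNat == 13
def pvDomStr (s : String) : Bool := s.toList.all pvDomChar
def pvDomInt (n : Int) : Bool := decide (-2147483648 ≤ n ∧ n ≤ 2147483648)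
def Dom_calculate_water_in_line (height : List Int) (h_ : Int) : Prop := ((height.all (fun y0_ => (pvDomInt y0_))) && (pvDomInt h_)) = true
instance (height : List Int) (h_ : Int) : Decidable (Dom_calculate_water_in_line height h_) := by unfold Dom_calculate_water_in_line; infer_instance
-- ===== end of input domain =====

-- B replaces A's running blocks-list/gap accumulation with a closed form over the qualifying
-- indices (last - first - count + 1); objective: simpler, same O(n) cost.


-- ===== PORT A =====
-- loop over enumerate(height): append qualifying index to blocks, add the gap to water
def aLoop (h_ : Int) : List (Int × Int) → List Int → Int → Int
  | [], _, water => water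
  | (index, element) :: rest, blocks, water =>
    if element ≥ h_ then
      let blocks' := blocks ++ [index]
      let water' :=
        if blocks'.length > 1 ∧
            PySem.List.pyGetD blocks' (-1) 0 - PySem.List.pyGetD blocks' (-2) 0 > 1 then
          water + (PySem.List.pyGetD blocks' (-1) 0 - PySem.List.pyGetD blocks' (-2) 0 - 1)
        else water
      aLoop h_ rest blocks' water'
    else aLoop h_ rest blocks water

def calculate_water_in_line (height : List Int) (h_ : Int) : Int :=
  aLoop h_ (PySem.List.enumerate height) [] 0

-- ===== PORT B =====
def calculate_water_in_line_alt (height : List Int) (h_ : Int) : Int :=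
  let idxs := (PySem.List.enumerate height).filterMap
    (fun p => if p.2 ≥ h_ then some p.1 else none)
  if idxs.length < 2 then 0
  else PySem.List.pyGetD idxs (-1) 0 - PySem.List.pyGetD idxs 0 0 - idxs.length + 1

-- ===== PRECONDITION & SPEC =====
def Spec_calculate_water_in_line (height : List Int) (h_ : Int) (out : Int) : Prop := out = calculate_water_in_line_alt height h_
instance (height : List Int) (h_ : Int) (out : Int) : Decidable (Spec_calculate_water_in_line height h_ out) := by unfold Spec_calculate_water_in_line; infer_instance

-- ===== CLAIM (what is proved, stated in full; the proofs are below) =====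
def Claim_equal_calculate_water_in_line : Prop := ∀ (height : List Int) (h_ : Int), Dom_calculate_water_in_line height h_ → Spec_calculate_water_in_line height h_ (calculate_water_in_line height h_)

-- ===== LEMMAS AND PROOFS =====

-- abstract version of A's accumulation: the water added is determined by the last block and
-- the stream of further qualifying indices
def gGap : Option Int → List Int → Int
  | _, [] => 0
  | none, x :: xs => gGap (some x) xs
  | some b, x :: xs => (if x - b > 1 then x - b - 1 else 0) + gGap (some x) xs

def idxsOf (h_ : Int) (pairs : List (Int × Int)) : List Int :=
  pairs.filterMap (fun p => if p.2 ≥ h_ then some p.1 else none)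

lemma pyGetD_neg_two_concat (ys : List Int) (b x : Int) :
    PySem.List.pyGetD (ys ++ [b, x]) (-2) 0 = b := by
  rw [PySem.List.pyGetD_neg_ofNat _ 2 0 (by omega) (by simp)]
  simp

lemma pyGetD_neg_one_concat2 (ys : List Int) (b x : Int) :
    PySem.List.pyGetD (ys ++ [b, x]) (-1) 0 = x := by
  rw [show ys ++ [b, x] = (ys ++ [b]) ++ [x] by simp]
  exact PySem.List.pyGetD_neg_one_append_singleton _ _ _

lemma aLoop_eq_gGap (h_ : Int) (pairs : List (Int × Int)) :
    ∀ (blocks : List Int) (water : Int),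
      aLoop h_ pairs blocks water = water + gGap blocks.getLast? (idxsOf h_ pairs) := by
  induction pairs with
  | nil => intro blocks water; simp [aLoop, idxsOf, gGap]
  | cons p rest ih =>
    intro blocks water
    obtain ⟨i, e⟩ := p
    by_cases he : e ≥ h_
    · rcases List.eq_nil_or_concat blocks with hb | ⟨ys, b, hb⟩
      · subst hb
        simp only [aLoop, he, List.nil_append, List.length_cons, List.length_nil, idxsOf,
          List.filterMap_cons]
        rw [ih]
        simp [gGap, idxsOf]
      · subst hb
        simp only [aLoop, he]
        rw [ih]
        simp only [List.concat_eq_append, List.append_assoc, List.cons_append,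
          List.nil_append] at *
        rw [pyGetD_neg_two_concat, pyGetD_neg_one_concat2]
        have hlast : (ys ++ [b, i] : List Int).getLast? = some i := by simp
        have hlast' : (ys ++ [b] : List Int).getLast? = some b := by simp
        simp only [hlast, hlast', idxsOf, List.filterMap_cons, if_pos he, gGap]
        have hlen : ((ys ++ [b, i] : List Int).length > 1) := by simp
        generalize gGap (some i) (List.filterMap (fun p => if p.2 ≥ h_ then some p.1 else none) rest) = G
        split_ifs with hc1 <;> simp_all <;> omega
    · simp only [aLoop, if_neg he, idxsOf, List.filterMap_cons]
      exact ih blocks water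

lemma gGap_closed (xs : List Int) : ∀ (b : Int) (hne : xs ≠ []), (b :: xs).Pairwise (· < ·) →
    gGap (some b) xs = xs.getLast hne - b - xs.length := by
  induction xs with
  | nil => intro b hne; exact absurd rfl hne
  | cons x xs ih =>
    intro b _ hch
    have hbx : b < x := List.rel_of_pairwise_cons hch (by simp)
    have hch' : (x :: xs).Pairwise (· < ·) := hch.of_cons
    rcases List.eq_nil_or_concat' xs with hx | ⟨ys, y, hx⟩
    · subst hx
      simp only [gGap, List.getLast_singleton, List.length_cons, List.length_nil]
      split <;> push_cast <;> omega
    · have hne' : xs ≠ [] := by subst hx; simp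
      have hrec := ih x hne' hch'
      rw [show (x :: xs).getLast (by simp) = xs.getLast hne' from List.getLast_cons hne']
      simp only [gGap, List.length_cons]
      rw [hrec]
      split <;> push_cast <;> omega

lemma idxs_pairwise (height : List Int) (h_ : Int) :
    (idxsOf h_ (PySem.List.enumerate height)).Pairwise (· < ·) := by
  have hp := PySem.List.pairwise_lt_enumerate height 0
  unfold idxsOf
  refine List.Pairwise.filterMap _ (fun a a' hlt b hb b' hb' => ?_) hp
  split at hb <;> split at hb' <;> simp_all

lemma final_aux (L : List Int) (hp : L.Pairwise (· < ·)) :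
    gGap none L = if L.length < 2 then 0
      else PySem.List.pyGetD L (-1) 0 - PySem.List.pyGetD L 0 0 - L.length + 1 := by
  match L with
  | [] => simp [gGap]
  | [x] => simp [gGap]
  | x :: y :: zs =>
    have hne : (y :: zs : List Int) ≠ [] := by simp
    have hg := gGap_closed (y :: zs) x hne hp
    have hlen : ¬ ((x :: y :: zs : List Int).length < 2) := by simp
    have h1 : PySem.List.pyGetD (x :: y :: zs) (-1) 0 = (y :: zs).getLast hne := by
      rw [PySem.List.pyGetD_neg_one _ _ (by simp)]
      rw [show (x :: y :: zs : List Int).getLast (by simp) = (y :: zs).getLast hne from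
        List.getLast_cons hne]
    have h0 : PySem.List.pyGetD (x :: y :: zs) 0 0 = x := PySem.List.pyGetD_zero_cons _ _ _
    rw [show gGap none (x :: y :: zs) = gGap (some x) (y :: zs) from rfl, hg, if_neg hlen, h1, h0]
    simp only [List.length_cons]
    push_cast
    ring

-- ===== VERDICT (by name: the statement is the Claim_ definition above) =====
theorem calculate_water_in_line_spec : Claim_equal_calculate_water_in_line := by
  intro height h_ _
  have hA := aLoop_eq_gGap h_ (PySem.List.enumerate height) [] 0
  have hF := final_aux _ (idxs_pairwise height h_)
  unfold Spec_calculate_water_in_line calculate_water_in_line calculate_water_in_line_alt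
  rw [hA]
  simp only [List.getLast?_nil, zero_add]
  rw [hF]
  simp [idxsOf]
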